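-- pv_equiv track=rewrite | github.com/igrisknight/security | PlayfairCipher.py | format_plaintext
-- ===== SOURCE A (Python) =====
-- def format_plaintext(plaintext):
--     plaintext = plaintext.upper().replace('J', 'I')
--     formatted_text = ''
--
--     i = 0
--     while i < len(plaintext):
--         formatted_text += plaintext[i]
--         # Check for repeating characters
--         if i + 1 < len(plaintext) and plaintext[i] == plaintext[i + 1]:
--             formatted_text += 'X'  # Insert X between repeating characters
--         elif i + 1 >= len(plaintext):
--             formatted_text += 'X'  # Add X if the text length is odd
--         else:
--             formatted_text += plaintext[i + 1]
--         i += 2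
--
--     return formatted_text  # Correctly return formatted text
-- ===== SOURCE B (Python) =====
-- def format_plaintext(plaintext):
--     pieces = []
--     pending = None
--     for c in plaintext.upper().replace('J', 'I'):
--         if pending is None:
--             pending = c
--         elif c == pending:
--             pieces.append(pending + 'X')
--             pending = None
--         else:
--             pieces.append(pending + c)
--             pending = None
--     if pending is not None:
--         pieces.append(pending + 'X')
--     return ''.join(pieces)
-- ===== Notes on version B (the rewrite author's own statement) =====
-- stated objective: faster
-- what changed: Replaced the index-jumping while loop that grows the result by repeated string += with a one-pass state machine folding over the characters with an optional pending first-of-pair character, collecting digraph pieces and joining them once at the end.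
import Mathlib
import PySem

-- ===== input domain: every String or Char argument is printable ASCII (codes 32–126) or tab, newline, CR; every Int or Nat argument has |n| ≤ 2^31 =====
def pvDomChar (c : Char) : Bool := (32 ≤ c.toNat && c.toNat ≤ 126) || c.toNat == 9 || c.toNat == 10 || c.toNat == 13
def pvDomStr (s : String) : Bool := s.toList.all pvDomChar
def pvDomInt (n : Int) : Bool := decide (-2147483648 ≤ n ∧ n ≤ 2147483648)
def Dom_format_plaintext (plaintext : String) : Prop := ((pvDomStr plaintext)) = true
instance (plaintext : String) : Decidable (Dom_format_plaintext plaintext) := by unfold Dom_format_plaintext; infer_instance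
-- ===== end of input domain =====

-- B replaces A's index-jumping while loop (string += per step) by a one-pass pending-character
-- state machine collecting digraph pieces; alternative decomposition, return value proved equal.


-- ===== PORT A =====
-- A's while loop over the index i (Python int; it starts at 0 and only grows by 2, so Nat is exact),
-- appending to formatted_text; the accumulator is the List Char of the string built so far.
def pvALoop (s : List Char) (i : Nat) (acc : List Char) : List Char :=
  if _h : i < s.length then
    -- formatted_text += plaintext[i]
    let acc1 := acc ++ [PySem.List.pyGetD s (i : Int) 'X']
    let acc2 :=
      if i + 1 < s.length ∧
          PySem.List.pyGetD s (i : Int) 'X' = PySem.List.pyGetD s ((i : Int) + 1) 'X' then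
        acc1 ++ ['X']
      else if i + 1 ≥ s.length then
        acc1 ++ ['X']
      else
        acc1 ++ [PySem.List.pyGetD s ((i : Int) + 1) 'X']
    pvALoop s (i + 2) acc2
  else acc
termination_by s.length - i

def format_plaintext (plaintext : String) : String :=
  let s := (PySem.Str.replace (PySem.Str.upper plaintext) "J" "I").toList
  String.ofList (pvALoop s 0 [])

-- ===== PORT B =====
-- one fold step: state = (pieces built so far, optional pending first-of-pair character)
def pvBStep (st : List (List Char) × Option Char) (c : Char) : List (List Char) × Option Char :=
  match st.2 with
  | none => (st.1, some c)
  | some p => if c = p then (st.1 ++ [[p, 'X']], none) else (st.1 ++ [[p, c]], none)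

def format_plaintext_alt (plaintext : String) : String :=
  let s := (PySem.Str.replace (PySem.Str.upper plaintext) "J" "I").toList
  let st := s.foldl pvBStep ([], none)
  let pieces := match st.2 with
    | some p => st.1 ++ [[p, 'X']]
    | none => st.1
  String.ofList (PySem.Chars.join [] pieces)

-- ===== PRECONDITION & SPEC =====
def Spec_format_plaintext (plaintext : String) (out : String) : Prop := out = format_plaintext_alt plaintext
instance (plaintext : String) (out : String) : Decidable (Spec_format_plaintext plaintext out) := by unfold Spec_format_plaintext; infer_instance

-- ===== CLAIM (what is proved, stated in full; the proofs are below) =====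
def Claim_equal_format_plaintext : Prop := ∀ (plaintext : String), Dom_format_plaintext plaintext → Spec_format_plaintext plaintext (format_plaintext plaintext)

-- ===== LEMMAS AND PROOFS =====

-- the common digraph function both loops compute
def pvPairs : List Char → List Char
  | [] => []
  | [c] => [c, 'X']
  | c :: d :: r => c :: (if d = c then 'X' else d) :: pvPairs r

theorem pvALoop_eq (s : List Char) : ∀ (n i : Nat) (acc : List Char), s.length - i ≤ n →
    pvALoop s i acc = acc ++ pvPairs (s.drop i) := by
  intro n
  induction n with
  | zero =>
    intro i acc hn
    have h : ¬ i < s.length := by omega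
    rw [pvALoop]
    simp only [h, dif_neg, not_false_iff]
    rw [List.drop_eq_nil_of_le (by omega)]
    simp [pvPairs]
  | succ n ih =>
    intro i acc hn
    rw [pvALoop]
    by_cases h : i < s.length
    · simp only [h, dif_pos]
      have hdrop : s.drop i = s[i] :: s.drop (i + 1) := List.drop_eq_getElem_cons h
      have hg1 : PySem.List.pyGetD s (i : Int) 'X' = s[i] := by
        rw [PySem.List.pyGetD_natCast]
        simp [List.getD, List.getElem?_eq_getElem h]
      by_cases h2 : i + 1 < s.length
      · have hdrop2 : s.drop (i + 1) = s[i + 1] :: s.drop (i + 2) := List.drop_eq_getElem_cons h2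
        have hg2 : PySem.List.pyGetD s ((i : Int) + 1) 'X' = s[i + 1] := by
          have hcast : ((i : Int) + 1) = ((i + 1 : Nat) : Int) := by push_cast; ring
          rw [hcast, PySem.List.pyGetD_natCast]
          simp [List.getD, List.getElem?_eq_getElem h2]
        rw [ih (i + 2) _ (by omega)]
        rw [hdrop, hdrop2, pvPairs, hg1, hg2]
        by_cases he : s[i] = s[i + 1]
        · simp [h2, he]
        · have h3 : ¬ s.length ≤ i + 1 := by omega
          have hne : ¬ (s[i + 1] = s[i]) := fun hx => he hx.symm
          simp [h2, he, h3, hne]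
      · rw [ih (i + 2) _ (by omega)]
        have hdrop2 : s.drop (i + 1) = [] := List.drop_eq_nil_of_le (by omega)
        have hdrop3 : s.drop (i + 2) = [] := List.drop_eq_nil_of_le (by omega)
        rw [hdrop, hdrop2, hdrop3, pvPairs, hg1]
        have h3 : s.length ≤ i + 1 := by omega
        simp [h2, h3, pvPairs]
    · simp only [h, dif_neg, not_false_iff]
      rw [List.drop_eq_nil_of_le (by omega)]
      simp [pvPairs]

theorem pvJoin_nil_flatten (l : List (List Char)) : PySem.Chars.join [] l = l.flatten := by
  induction l with
  | nil => simp [PySem.Chars.join_nil]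
  | cons p rest ih =>
    cases rest with
    | nil => simp [PySem.Chars.join_singleton]
    | cons q r => rw [PySem.Chars.join_cons_cons, ih]; simp

theorem pvBFold_eq (s : List Char) (pieces : List (List Char)) :
    (let st := s.foldl pvBStep (pieces, none)
     (match st.2 with | some p => st.1 ++ [[p, 'X']] | none => st.1).flatten)
      = pieces.flatten ++ pvPairs s := by
  induction s using pvPairs.induct generalizing pieces with
  | case1 => simp [pvPairs]
  | case2 c => simp [pvPairs, pvBStep]
  | case3 c d r ih =>
    simp only [List.foldl_cons]
    have hstep1 : pvBStep (pieces, none) c = (pieces, some c) := by simp [pvBStep]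
    rw [hstep1]
    by_cases he : d = c
    · have hstep2 : pvBStep (pieces, some c) d = (pieces ++ [[c, 'X']], none) := by
        simp [pvBStep, he]
      rw [hstep2, ih]
      simp [pvPairs, he]
    · have hstep2 : pvBStep (pieces, some c) d = (pieces ++ [[c, d]], none) := by
        simp [pvBStep, he]
      rw [hstep2, ih]
      simp [pvPairs, he]

-- ===== VERDICT (by name: the statement is the Claim_ definition above) =====
theorem format_plaintext_spec : Claim_equal_format_plaintext := by
  intro plaintext _
  unfold Spec_format_plaintext
  simp only [format_plaintext, format_plaintext_alt]
  have hA := pvALoop_eq ((PySem.Str.replace (PySem.Str.upper plaintext) "J" "I").toList)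
      ((PySem.Str.replace (PySem.Str.upper plaintext) "J" "I").toList.length) 0 [] (by omega)
  have hB := pvBFold_eq ((PySem.Str.replace (PySem.Str.upper plaintext) "J" "I").toList) []
  simp only [List.drop_zero, List.nil_append] at hA
  simp only [List.flatten_nil, List.nil_append] at hB
  rw [hA, pvJoin_nil_flatten, hB]
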